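-- pv_equiv track=rewrite | github.com/szewmich/battle_ships | generator_gpt.py | list_valid_placements
-- ===== SOURCE A (Python) =====
-- BOARD_SIZE = 6
--
-- def check_spacing(board, coords):
--     for (x, y) in coords:
--         for dx in (-1, 0, 1):
--             for dy in (-1, 0, 1):
--                 nx, ny = x + dx, y + dy
--                 if 0 <= nx < BOARD_SIZE and 0 <= ny < BOARD_SIZE:
--                     if (nx, ny) not in coords and board[nx][ny] != 0:
--                         return False
--     return True
--
-- def list_valid_placements(board, size):
--     placements = []
--     for x in range(BOARD_SIZE):
--         for y in range(BOARD_SIZE):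
--             # rightwards (horizontal)
--             if y + size <= BOARD_SIZE:
--                 coords = [(x, y + i) for i in range(size)]
--                 if all(board[cx][cy] == 0 for cx, cy in coords) and check_spacing(board, coords):
--                     placements.append(('H', x, y))
--             # downwards (vertical)
--             if x + size <= BOARD_SIZE:
--                 coords = [(x + i, y) for i in range(size)]
--                 if all(board[cx][cy] == 0 for cx, cy in coords) and check_spacing(board, coords):
--                     placements.append(('V', x, y))
--     return placements
-- ===== SOURCE B (Python) =====
-- BOARD_SIZE = 6
--
--
-- def _cell(board, x, y):
--     # bounds-safe read: cells outside the stored board read as 0 (never hit on 6x6 boards)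
--     if x < len(board) and y < len(board[x]):
--         return board[x][y]
--     return 0
--
--
-- def _clear(board, x, y):
--     # True iff (x, y) and every in-bounds neighbour is empty
--     return all(_cell(board, nx, ny) == 0
--                for nx in range(max(0, x - 1), min(BOARD_SIZE, x + 2))
--                for ny in range(max(0, y - 1), min(BOARD_SIZE, y + 2)))
--
--
-- def list_valid_placements(board, size):
--     clear = [[_clear(board, x, y) for y in range(BOARD_SIZE)]
--              for x in range(BOARD_SIZE)]
--     placements = []
--     for x in range(BOARD_SIZE):
--         for y in range(BOARD_SIZE):
--             if y + size <= BOARD_SIZE and all(clear[x][y + i] for i in range(size)):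
--                 placements.append(('H', x, y))
--             if x + size <= BOARD_SIZE and all(clear[x + i][y] for i in range(size)):
--                 placements.append(('V', x, y))
--     return placements
-- ===== Notes on version B (the rewrite author's own statement) =====
-- stated objective: alternative
-- what changed: B replaces A's per-placement check_spacing rescan (3x3 neighbourhood of every ship cell, with a 'not in coords' membership test, re-done for every candidate) by one precomputed 6x6 'clear' table (cell and all in-bounds neighbours empty), so each candidate placement is accepted by one table lookup per ship cell.
import Mathlib
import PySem

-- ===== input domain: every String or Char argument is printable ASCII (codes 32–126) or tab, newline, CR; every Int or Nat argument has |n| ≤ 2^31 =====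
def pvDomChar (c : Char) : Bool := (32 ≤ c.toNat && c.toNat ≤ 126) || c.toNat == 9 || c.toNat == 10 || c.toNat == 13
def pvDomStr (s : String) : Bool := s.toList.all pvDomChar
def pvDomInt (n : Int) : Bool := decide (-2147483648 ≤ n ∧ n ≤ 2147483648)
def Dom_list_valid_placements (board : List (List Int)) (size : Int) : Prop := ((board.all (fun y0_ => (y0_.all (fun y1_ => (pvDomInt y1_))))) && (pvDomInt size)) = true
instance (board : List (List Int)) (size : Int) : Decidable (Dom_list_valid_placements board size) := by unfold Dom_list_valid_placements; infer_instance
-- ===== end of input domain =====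

-- B precomputes one 6x6 'clear' table (cell and all in-bounds neighbours empty) instead of
-- re-scanning every ship cell's neighbourhood per candidate placement (objective: alternative).


-- ===== PORT A =====
-- board[x][y], totalized: exact wherever Python does not raise IndexError (all reads are
-- in range on the inputs Pre_ admits; indices here are always ≥ 0).
def pvCell (board : List (List Int)) (x y : Int) : Int :=
  (PySem.List.pyGet? ((PySem.List.pyGet? board x).getD []) y).getD 0

def pvCheckSpacing (board : List (List Int)) (coords : List (Int × Int)) : Bool :=
  coords.all fun c =>
    ([-1, 0, 1] : List Int).all fun dx =>
      ([-1, 0, 1] : List Int).all fun dy =>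
        let nx := c.1 + dx
        let ny := c.2 + dy
        if 0 ≤ nx ∧ nx < 6 ∧ 0 ≤ ny ∧ ny < 6 then
          !(!(coords.contains (nx, ny)) && (pvCell board nx ny != 0))
        else true

def list_valid_placements (board : List (List Int)) (size : Int) : List (String × Int × Int) :=
  (PySem.List.pyRange 0 6 1).foldl (fun acc x =>
    (PySem.List.pyRange 0 6 1).foldl (fun acc y =>
      let acc :=
        if y + size ≤ 6 then
          let coords := (PySem.List.pyRange 0 size 1).map fun i => (x, y + i)
          if coords.all (fun c => pvCell board c.1 c.2 == 0) && pvCheckSpacing board coords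
          then acc ++ [("H", x, y)] else acc
        else acc
      if x + size ≤ 6 then
        let coords := (PySem.List.pyRange 0 size 1).map fun i => (x + i, y)
        if coords.all (fun c => pvCell board c.1 c.2 == 0) && pvCheckSpacing board coords
        then acc ++ [("V", x, y)] else acc
      else acc) acc) []

-- ===== PORT B =====
-- Source B's _cell is the same bounds-safe read as pvCell (indices are always ≥ 0 here).
def pvClearCell (board : List (List Int)) (x y : Int) : Bool :=
  (PySem.List.pyRange (max 0 (x - 1)) (min 6 (x + 2)) 1).all fun nx =>
    (PySem.List.pyRange (max 0 (y - 1)) (min 6 (y + 2)) 1).all fun ny =>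
      pvCell board nx ny == 0

def pvClearGrid (board : List (List Int)) : List (List Bool) :=
  (PySem.List.pyRange 0 6 1).map fun x =>
    (PySem.List.pyRange 0 6 1).map fun y => pvClearCell board x y

-- clear[x][y] (always in range when read)
def pvGridAt (g : List (List Bool)) (x y : Int) : Bool :=
  (PySem.List.pyGet? ((PySem.List.pyGet? g x).getD []) y).getD true

def list_valid_placements_alt (board : List (List Int)) (size : Int) : List (String × Int × Int) :=
  let clear := pvClearGrid board
  (PySem.List.pyRange 0 6 1).foldl (fun acc x =>
    (PySem.List.pyRange 0 6 1).foldl (fun acc y =>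
      let acc :=
        if y + size ≤ 6 ∧ ((PySem.List.pyRange 0 size 1).all fun i => pvGridAt clear x (y + i))
        then acc ++ [("H", x, y)] else acc
      if x + size ≤ 6 ∧ ((PySem.List.pyRange 0 size 1).all fun i => pvGridAt clear (x + i) y)
      then acc ++ [("V", x, y)] else acc) acc) []

-- ===== PRECONDITION & SPEC =====
-- Pre_ excludes boards smaller than 6x6 when 1 ≤ size ≤ 6: there Python A's board[x][y] reads
-- normally raise IndexError (on the rare such boards where nonzero cells make every read
-- short-circuit, A returns and B happens to agree anyway — see the cite).
def Pre_list_valid_placements (board : List (List Int)) (size : Int) : Prop :=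
  size ≤ 0 ∨ 6 < size ∨ (6 ≤ board.length ∧ ∀ row ∈ board.take 6, 6 ≤ row.length)
instance (board : List (List Int)) (size : Int) : Decidable (Pre_list_valid_placements board size) := by unfold Pre_list_valid_placements; infer_instance

def pvWitness_list_valid_placements : List (List Int) × Int :=
  ([[0,0,0,0,0,0],[0,0,0,0,0,0],[0,0,1,0,0,0],[0,0,0,0,0,0],[0,0,0,0,0,0],[0,0,0,0,0,0]], 2)

def Spec_list_valid_placements (board : List (List Int)) (size : Int) (out : List (String × Int × Int)) : Prop := out = list_valid_placements_alt board size
instance (board : List (List Int)) (size : Int) (out : List (String × Int × Int)) : Decidable (Spec_list_valid_placements board size out) := by unfold Spec_list_valid_placements; infer_instance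

-- ===== CLAIM (what is proved, stated in full; the proofs are below) =====
def Claim_equal_list_valid_placements : Prop := ∀ (board : List (List Int)) (size : Int), Dom_list_valid_placements board size → Pre_list_valid_placements board size → Spec_list_valid_placements board size (list_valid_placements board size)

-- ===== LEMMAS AND PROOFS =====

theorem pvRangeSix : PySem.List.pyRange 0 6 1 = [0, 1, 2, 3, 4, 5] := by decide

theorem pvAll_congr {α : Type} (l : List α) (p q : α → Bool)
    (h : ∀ a ∈ l, p a = q a) : l.all p = l.all q := by
  induction l with
  | nil => rfl
  | cons a t ih =>
    simp only [List.all_cons]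
    rw [h a (List.mem_cons_self), ih (fun b hb => h b (List.mem_cons_of_mem _ hb))]

-- grid lookup = the function the grid was built from, for in-range indices
theorem pvGridAt_clear (board : List (List Int)) (x y : Int)
    (hx0 : 0 ≤ x) (hx6 : x < 6) (hy0 : 0 ≤ y) (hy6 : y < 6) :
    pvGridAt (pvClearGrid board) x y = pvClearCell board x y := by
  unfold pvGridAt pvClearGrid
  rw [pvRangeSix]
  interval_cases x <;> interval_cases y <;> rfl

-- core: "all ship cells empty and check_spacing" = "every ship cell's whole in-bounds
-- neighbourhood (itself included) is empty", for ship cells inside the 6x6 grid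
theorem pvCond_eq (board : List (List Int)) (coords : List (Int × Int))
    (hb : ∀ c ∈ coords, 0 ≤ c.1 ∧ c.1 < 6 ∧ 0 ≤ c.2 ∧ c.2 < 6) :
    ((coords.all fun c => pvCell board c.1 c.2 == 0) && pvCheckSpacing board coords)
      = coords.all fun c => pvClearCell board c.1 c.2 := by
  rw [Bool.eq_iff_iff]
  simp only [Bool.and_eq_true, List.all_eq_true, pvCheckSpacing, pvClearCell,
    PySem.List.mem_pyRange_one, List.mem_cons, List.not_mem_nil, or_false, beq_iff_eq]
  constructor
  · rintro ⟨hz, hs⟩ c hc nx ⟨hnx1, hnx2⟩ ny ⟨hny1, hny2⟩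
    obtain ⟨hc1, hc2, hc3, hc4⟩ := hb c hc
    have h1 := hs c hc (nx - c.1) (by omega) (ny - c.2) (by omega)
    simp only [add_sub_cancel] at h1
    rw [if_pos (show (0:Int) ≤ nx ∧ nx < 6 ∧ 0 ≤ ny ∧ ny < 6 by omega)] at h1
    simp only [Bool.not_and, Bool.not_not, Bool.or_eq_true, List.contains_eq_mem,
      decide_eq_true_eq, Bool.not_eq_true', bne_eq_false_iff_eq] at h1
    rcases h1 with h1 | h1
    · exact hz _ h1
    · exact h1
  · intro h
    refine ⟨fun c hc => ?_, fun c hc dx hdx dy hdy => ?_⟩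
    · obtain ⟨hc1, hc2, hc3, hc4⟩ := hb c hc
      exact h c hc c.1 (by omega) c.2 (by omega)
    · obtain ⟨hc1, hc2, hc3, hc4⟩ := hb c hc
      by_cases hin : 0 ≤ c.1 + dx ∧ c.1 + dx < 6 ∧ 0 ≤ c.2 + dy ∧ c.2 + dy < 6
      · rw [if_pos hin]
        have h0 : pvCell board (c.1 + dx) (c.2 + dy) = 0 :=
          h c hc (c.1 + dx) (by omega) (c.2 + dy) (by omega)
        simp [h0]
      · rw [if_neg hin]

theorem pvAlt_eq (board : List (List Int)) (size : Int) :
    list_valid_placements_alt board size =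
      (PySem.List.pyRange 0 6 1).foldl (fun acc x =>
        (PySem.List.pyRange 0 6 1).foldl (fun acc y =>
          let acc :=
            if y + size ≤ 6 ∧ ((PySem.List.pyRange 0 size 1).all fun i =>
                pvGridAt (pvClearGrid board) x (y + i))
            then acc ++ [("H", x, y)] else acc
          if x + size ≤ 6 ∧ ((PySem.List.pyRange 0 size 1).all fun i =>
              pvGridAt (pvClearGrid board) (x + i) y)
          then acc ++ [("V", x, y)] else acc) acc) [] := rfl

theorem list_valid_placements_spec : Claim_equal_list_valid_placements := by
  intro board size _ _
  unfold Spec_list_valid_placements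
  rw [pvAlt_eq]
  unfold list_valid_placements
  refine PySem.List.foldl_congr_mem _ _ _ _ ?_
  intro acc x hx
  rw [PySem.List.mem_pyRange_one] at hx
  refine PySem.List.foldl_congr_mem _ _ _ _ ?_
  intro acc y hy
  rw [PySem.List.mem_pyRange_one] at hy
  have hH : y + size ≤ 6 →
      (((PySem.List.pyRange 0 size 1).map fun i => (x, y + i)).all
          (fun c => pvCell board c.1 c.2 == 0) &&
        pvCheckSpacing board ((PySem.List.pyRange 0 size 1).map fun i => (x, y + i)))
        = (PySem.List.pyRange 0 size 1).all fun i => pvGridAt (pvClearGrid board) x (y + i) := by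
    intro hyg
    rw [pvCond_eq]
    · rw [List.all_map]
      refine (pvAll_congr _ _ _ ?_).symm
      intro i hi
      rw [PySem.List.mem_pyRange_one] at hi
      exact pvGridAt_clear board x (y + i) (by omega) (by omega) (by omega) (by omega)
    · intro c hc
      simp only [List.mem_map, PySem.List.mem_pyRange_one] at hc
      obtain ⟨i, hi, rfl⟩ := hc
      exact ⟨by omega, by omega, by omega, by omega⟩
  have hV : x + size ≤ 6 →
      (((PySem.List.pyRange 0 size 1).map fun i => (x + i, y)).all
          (fun c => pvCell board c.1 c.2 == 0) &&
        pvCheckSpacing board ((PySem.List.pyRange 0 size 1).map fun i => (x + i, y)))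
        = (PySem.List.pyRange 0 size 1).all fun i => pvGridAt (pvClearGrid board) (x + i) y := by
    intro hxg
    rw [pvCond_eq]
    · rw [List.all_map]
      refine (pvAll_congr _ _ _ ?_).symm
      intro i hi
      rw [PySem.List.mem_pyRange_one] at hi
      exact pvGridAt_clear board (x + i) y (by omega) (by omega) (by omega) (by omega)
    · intro c hc
      simp only [List.mem_map, PySem.List.mem_pyRange_one] at hc
      obtain ⟨i, hi, rfl⟩ := hc
      exact ⟨by omega, by omega, by omega, by omega⟩
  by_cases hyg : y + size ≤ 6 <;> by_cases hxg : x + size ≤ 6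
  · simp only [hH hyg, hV hxg]; simp [hyg, hxg]
  · simp only [hH hyg]; simp [hyg, hxg]
  · simp only [hV hxg]; simp [hyg, hxg]
  · simp [hyg, hxg]
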